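-- pv_equiv track=rewrite | github.com/dlitskevich/poisson-deconvolution | optimal_deconvolution/utils.py | setpartition
-- ===== SOURCE A (Python) =====
-- from itertools import combinations
--
-- def setpartition(iterable, n=2):
--     """
--     Generate all set partitions of an iterable into n groups.
--
--     Parameters:
--     iterable (iterable): The iterable to partition.
--     n (int): The number of elemets in each group.
--
--     Returns:
--     generator: A generator of all set partitions of the iterable into groups of size n.
--     """
--     iterable = list(iterable)
--     partitions = combinations(combinations(iterable, r=n), r=len(iterable) // n)
--     for partition in partitions:
--         seen = set()
--         for group in partition:
--             if seen.intersection(group):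
--                 break
--             seen.update(group)
--         else:
--             yield partition
-- ===== SOURCE B (Python) =====
-- from itertools import combinations
--
-- def setpartition(iterable, n=2):
--     """Backtracking: pick the first free element as leader of the next group,
--     choose its partners among the later free elements, recurse on what is left,
--     so only pairwise-disjoint partial partitions are ever built."""
--     items = list(iterable)
--     m = len(items) // n
--
--     def backtrack(free, k):
--         if k == 0:
--             yield ()
--             return
--         if len(free) < k * n:
--             return
--         head, rest = free[0], free[1:]
--         for partners in combinations(rest, n - 1):
--             remaining = [x for x in rest if x not in partners]
--             for tail in backtrack(remaining, k - 1):
--                 yield ((head,) + partners,) + tail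
--         yield from backtrack(rest, k)
--
--     yield from backtrack(items, m)
-- ===== Notes on version B (the rewrite author's own statement) =====
-- stated objective: alternative
-- what changed: A enumerates every m-combination of the list of all n-combinations and filters out the overlapping ones; B backtracks instead, always making the first free element the leader of the next group and choosing its partners among the later free elements, so only disjoint partial partitions are ever built; on inputs whose output is itself huge both still enumerate everything, so no speed is claimed.
-- outside the precondition, e.g. on setpartition([1, 1], 1): A returns [], B returns [((1,), (1,))]; on setpartition([1, 2], 0): A raises ZeroDivisionError, B raises ZeroDivisionError
import Mathlib
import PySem

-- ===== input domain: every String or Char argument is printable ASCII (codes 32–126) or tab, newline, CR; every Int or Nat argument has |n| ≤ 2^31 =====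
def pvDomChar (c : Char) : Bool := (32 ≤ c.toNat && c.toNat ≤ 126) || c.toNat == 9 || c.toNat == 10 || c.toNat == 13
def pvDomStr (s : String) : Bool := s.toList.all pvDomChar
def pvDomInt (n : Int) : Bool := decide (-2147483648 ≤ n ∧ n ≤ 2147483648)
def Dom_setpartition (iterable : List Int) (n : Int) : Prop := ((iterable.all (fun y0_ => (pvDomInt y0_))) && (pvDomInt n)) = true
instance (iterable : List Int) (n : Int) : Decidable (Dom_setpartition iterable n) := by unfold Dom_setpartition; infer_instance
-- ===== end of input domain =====

-- B replaces A's filter over all combinations-of-combinations by disjointness-preserving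
-- backtracking (first free element leads the next group); a different algorithm, same output list.


-- itertools.combinations(xs, r): increasing-index r-subsequences in lexicographic order
def pvComb {α : Type} (xs : List α) (r : Nat) : List (List α) :=
  match r, xs with
  | 0, _ => [[]]
  | _ + 1, [] => []
  | r + 1, x :: t => (pvComb t r).map (x :: ·) ++ pvComb t (r + 1)

-- ===== PORT A =====
-- the inner for-loop over the groups of one candidate partition (seen : Python set)
def pvSeenLoop (partition : List (List Int)) (seen : PySem.Set Int) : Bool :=
  match partition with
  | [] => true
  | g :: rest =>
    if PySem.Set.inter seen g ≠ [] then false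
    else pvSeenLoop rest (PySem.Set.update seen g)

def setpartition (iterable : List Int) (n : Int) : List (List (List Int)) :=
  let combos := pvComb iterable n.toNat
  let parts := pvComb combos ((PySem.Int.floordiv iterable.length n).toNat)
  parts.filter (fun p => pvSeenLoop p PySem.Set.empty)

-- ===== PORT B =====
def pvBacktrack (n' : Nat) (free : List Int) (k : Nat) : List (List (List Int)) :=
  match k with
  | 0 => [[]]
  | k' + 1 =>
    if free.length < (k' + 1) * n' then []
    else
      match free with
      | [] => []
      | x :: rest =>
        ((pvComb rest (n' - 1)).flatMap (fun partners =>
          (pvBacktrack n' (rest.filter (fun y => !decide (y ∈ partners))) k').map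
            (fun tail => (x :: partners) :: tail)))
        ++ pvBacktrack n' rest (k' + 1)
termination_by (free.length, k)
decreasing_by
  · exact Prod.Lex.left _ _ (by
      simp only [List.length_cons, List.length_unattach]
      refine Nat.lt_succ_of_le (le_trans (List.length_filter_le _ _) ?_)
      simp)
  · exact Prod.Lex.left _ _ (by simp [List.length_cons])

def setpartition_alt (iterable : List Int) (n : Int) : List (List (List Int)) :=
  pvBacktrack n.toNat iterable ((PySem.Int.floordiv iterable.length n).toNat)

-- ===== PRECONDITION & SPEC =====
-- Pre_ excludes n ≤ 0 (A raises ZeroDivisionError or ValueError there) and lists with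
-- duplicate values, on which A's value-based disjointness test conflates equal elements
-- while B partitions the positions — both readings are defensible on such degenerate input.
def Pre_setpartition (iterable : List Int) (n : Int) : Prop := 1 ≤ n ∧ iterable.Nodup
instance (iterable : List Int) (n : Int) : Decidable (Pre_setpartition iterable n) := by
  unfold Pre_setpartition; infer_instance

def pvWitness_setpartition : List Int × Int := ([1, 2, 3, 4], 2)

def Spec_setpartition (iterable : List Int) (n : Int) (out : List (List (List Int))) : Prop := out = setpartition_alt iterable n
instance (iterable : List Int) (n : Int) (out : List (List (List Int))) : Decidable (Spec_setpartition iterable n out) := by unfold Spec_setpartition; infer_instance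

-- ===== CLAIM (what is proved, stated in full; the proofs are below) =====
def Claim_equal_setpartition : Prop := ∀ (iterable : List Int) (n : Int), Dom_setpartition iterable n → Pre_setpartition iterable n → Spec_setpartition iterable n (setpartition iterable n)

-- ===== LEMMAS AND PROOFS =====

-- plain-list version of the seen-loop (membership-only view of the Python set)
def pvChk (partition : List (List Int)) (s : List Int) : Bool :=
  match partition with
  | [] => true
  | g :: rest =>
    if g.all (fun y => !decide (y ∈ s)) then pvChk rest (s ++ g)
    else false

theorem pvSeenLoop_eq_chk (p : List (List Int)) (s : PySem.Set Int) (s' : List Int)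
    (h : ∀ a : Int, a ∈ s ↔ a ∈ s') : pvSeenLoop p s = pvChk p s' := by
  induction p generalizing s s' with
  | nil => rfl
  | cons g gs ih =>
    have hc : (PySem.Set.inter s g ≠ []) ↔ ¬ ((g.all fun y => !decide (y ∈ s')) = true) := by
      rw [← List.isEmpty_eq_false_iff, List.isEmpty_eq_false_iff_exists_mem]
      simp only [PySem.Set.mem_inter, List.all_eq_true, not_forall]
      constructor
      · rintro ⟨a, ha, hg⟩; exact ⟨a, hg, by simp [(h a).mp ha]⟩
      · rintro ⟨a, hg, ha⟩; exact ⟨a, (h a).mpr (by simpa using ha), hg⟩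
    simp only [pvSeenLoop, pvChk]
    by_cases hb : (g.all fun y => !decide (y ∈ s')) = true
    · rw [if_neg (fun hne => (hc.mp hne) hb), if_pos hb]
      exact ih _ _ (by intro a; simp [PySem.Set.mem_update, h a])
    · rw [if_pos (hc.mpr hb), if_neg hb]

theorem chk_ext (p : List (List Int)) (s t : List Int)
    (h : ∀ a : Int, a ∈ s ↔ a ∈ t) : pvChk p s = pvChk p t := by
  induction p generalizing s t with
  | nil => rfl
  | cons g gs ih =>
    have hc : (g.all fun y => !decide (y ∈ s)) = (g.all fun y => !decide (y ∈ t)) := by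
      rw [Bool.eq_iff_iff]
      simp only [List.all_eq_true]
      constructor <;> intro hh y hy <;> have := hh y hy <;> simp_all [h y]
    simp only [pvChk, hc]
    by_cases hb : (g.all fun y => !decide (y ∈ t)) = true <;> simp [hb]
    exact ih _ _ (by intro a; simp [List.mem_append, h a])

theorem chk_union (p : List (List Int)) (s t : List Int) :
    pvChk p (s ++ t) = ((p.all fun g => g.all fun y => !decide (y ∈ s)) && pvChk p t) := by
  induction p generalizing t with
  | nil => simp [pvChk]
  | cons g gs ih =>
    have hsplit : (g.all fun y => !decide (y ∈ s ++ t))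
        = ((g.all fun y => !decide (y ∈ s)) && (g.all fun y => !decide (y ∈ t))) := by
      rw [Bool.eq_iff_iff]
      simp only [Bool.and_eq_true, List.all_eq_true, List.mem_append]
      constructor
      · intro h; exact ⟨fun y hy => by have := h y hy; simp_all, fun y hy => by have := h y hy; simp_all⟩
      · intro h y hy; have h1 := h.1 y hy; have h2 := h.2 y hy; simp_all
    simp only [pvChk, List.all_cons, hsplit]
    cases h1 : (g.all fun y => !decide (y ∈ s)) with
    | false => simp
    | true =>
      cases h2 : (g.all fun y => !decide (y ∈ t)) with
      | false => simp
      | true =>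
        simp only [Bool.and_self, Bool.true_and, if_true]
        rw [List.append_assoc]
        exact ih (t ++ g)

theorem chk_split (p : List (List Int)) (s : List Int) :
    pvChk p s = ((p.all fun g => g.all fun y => !decide (y ∈ s)) && pvChk p []) := by
  have h : pvChk p s = pvChk p (s ++ []) := chk_ext p _ _ (by intro a; simp)
  rw [h, chk_union]

theorem comb_length {α : Type} {xs : List α} {r : Nat} {c : List α}
    (h : c ∈ pvComb xs r) : c.length = r := by
  induction xs generalizing r c with
  | nil =>
    cases r with
    | zero => simp [pvComb] at h; simp [h]
    | succ r => simp [pvComb] at h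
  | cons x t ih =>
    cases r with
    | zero => simp [pvComb] at h; simp [h]
    | succ r =>
      simp only [pvComb, List.mem_append, List.mem_map] at h
      rcases h with ⟨c', hc', rfl⟩ | h
      · simp [ih hc']
      · exact ih h

theorem comb_sublist {α : Type} {xs : List α} {r : Nat} {c : List α}
    (h : c ∈ pvComb xs r) : c.Sublist xs := by
  induction xs generalizing r c with
  | nil =>
    cases r with
    | zero => simp [pvComb] at h; simp [h]
    | succ r => simp [pvComb] at h
  | cons x t ih =>
    cases r with
    | zero => simp [pvComb] at h; simp [h]
    | succ r =>
      simp only [pvComb, List.mem_append, List.mem_map] at h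
      rcases h with ⟨c', hc', rfl⟩ | h
      · exact (ih hc').cons₂ x
      · exact (ih h).cons x

-- restriction: filtering the combinations whose elements all satisfy p = combinations of the filtered list
theorem comb_restrict {α : Type} (p : α → Bool) (xs : List α) (r : Nat) :
    (pvComb xs r).filter (fun c => c.all p) = pvComb (xs.filter p) r := by
  induction xs generalizing r with
  | nil => cases r <;> simp [pvComb]
  | cons x t ih =>
    cases r with
    | zero => simp [pvComb]
    | succ r =>
      simp only [pvComb, List.filter_append]
      by_cases hx : p x = true
      · rw [List.filter_cons_of_pos hx, pvComb, List.filter_map]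
        congr 1
        · have hcomp : ((fun c => c.all p) ∘ (x :: ·)) = fun c : List α => c.all p := by
            funext c; simp [Function.comp, List.all_cons, hx]
          rw [hcomp, ih]
        · exact ih (r + 1)
      · rw [List.filter_cons_of_neg (by simp [hx])]
        have hdead : (List.map (x :: ·) (pvComb t r)).filter (fun c => c.all p) = [] := by
          rw [List.filter_eq_nil_iff]
          intro c hc
          rcases List.mem_map.mp hc with ⟨c', _, rfl⟩
          simp [List.all_cons, hx]
        rw [hdead, List.nil_append, ih]

-- a true chk means every group avoids the seen set and the groups are pairwise disjoint
theorem chk_true_avoid (p : List (List Int)) (s : List Int) (h : pvChk p s = true) :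
    ∀ g ∈ p, ∀ x ∈ g, x ∉ s := by
  induction p generalizing s with
  | nil => simp
  | cons g gs ih =>
    rw [pvChk] at h
    by_cases hb : (g.all fun y => !decide (y ∈ s)) = true
    · rw [if_pos hb] at h
      intro g' hg' x hx
      rcases List.mem_cons.mp hg' with rfl | hg'
      · have := (List.all_eq_true.mp hb) x hx; simpa using this
      · have := ih (s ++ g) h g' hg' x hx
        simp only [List.mem_append] at this
        exact fun hxs => this (Or.inl hxs)
    · rw [if_neg hb] at h; exact absurd h (by simp)

theorem chk_true_pairwise (p : List (List Int)) (s : List Int) (h : pvChk p s = true) :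
    p.Pairwise (fun g h' => ∀ x ∈ h', x ∉ g) := by
  induction p generalizing s with
  | nil => exact List.Pairwise.nil
  | cons g gs ih =>
    rw [pvChk] at h
    by_cases hb : (g.all fun y => !decide (y ∈ s)) = true
    · rw [if_pos hb] at h
      refine List.Pairwise.cons ?_ (ih (s ++ g) h)
      intro g' hg' x hx
      have := chk_true_avoid gs (s ++ g) h g' hg' x hx
      simp only [List.mem_append] at this
      exact fun hxg => this (Or.inr hxg)
    · rw [if_neg hb] at h; exact absurd h (by simp)

-- Lemma S: a nonempty seen set is the same as pre-filtering the available combos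
theorem chk_filter_comb (s : List Int) (C : List (List Int)) (k : Nat) :
    (pvComb C k).filter (fun p => pvChk p s)
      = (pvComb (C.filter (fun g => g.all fun y => !decide (y ∈ s))) k).filter (fun p => pvChk p []) := by
  have h1 : (pvComb C k).filter (fun p => pvChk p s)
      = (pvComb C k).filter
          (fun p => (p.all fun g => g.all fun y => !decide (y ∈ s)) && pvChk p []) :=
    List.filter_congr (fun p _ => chk_split p s)
  rw [h1, ← comb_restrict (fun g => g.all fun y => !decide (y ∈ s)) C k, ← List.filter_filter]
  exact List.filter_comm _ _ _

-- pruning: too few elements ⇒ no disjoint partition survives the filter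
theorem flatMap_congr_mem {α β : Type} (l : List α) (f g : α → List β)
    (h : ∀ a ∈ l, f a = g a) : l.flatMap f = l.flatMap g := by
  induction l with
  | nil => rfl
  | cons a l ih =>
    simp only [List.flatMap_cons]
    rw [h a (List.mem_cons_self), ih (fun b hb => h b (List.mem_cons_of_mem a hb))]

theorem comb_prune (free : List Int) (n' k : Nat)
    (hnd : free.Nodup) (hlt : free.length < k * n') :
    (pvComb (pvComb free n') k).filter (fun p => pvChk p []) = [] := by
  rw [List.filter_eq_nil_iff]
  intro p hp hchk
  have hlenp : p.length = k := comb_length hp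
  have hmem : ∀ g ∈ p, g ∈ pvComb free n' := fun g hg => (comb_sublist hp).subset hg
  have hglen : ∀ g ∈ p, g.length = n' := fun g hg => comb_length (hmem g hg)
  have hgnd : ∀ g ∈ p, g.Nodup := fun g hg => (comb_sublist (hmem g hg)).nodup hnd
  have hpw : p.Pairwise (fun g h' => ∀ x ∈ h', x ∉ g) := chk_true_pairwise p [] hchk
  have hflatnd : p.flatten.Nodup := by
    rw [List.nodup_flatten]
    refine ⟨hgnd, hpw.imp ?_⟩
    intro g h' hgh' a hag hah'
    exact hgh' a hah' hag
  have hsub : ∀ x ∈ p.flatten, x ∈ free := by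
    intro x hx
    rcases List.mem_flatten.mp hx with ⟨g, hg, hxg⟩
    exact (comb_sublist (hmem g hg)).subset hxg
  have hflen : p.flatten.length = k * n' := by
    rw [List.length_flatten]
    have hrep : p.map List.length = List.replicate k n' := by
      refine List.eq_replicate_iff.mpr ⟨by simp [hlenp], ?_⟩
      intro b hb
      rcases List.mem_map.mp hb with ⟨g, hg, rfl⟩
      exact hglen g hg
    rw [hrep, List.sum_replicate, smul_eq_mul]
  have hle : p.flatten.length ≤ free.length := by
    have h1 : p.flatten.toFinset.card = p.flatten.length := List.toFinset_card_of_nodup hflatnd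
    have h2 : p.flatten.toFinset ⊆ free.toFinset := by
      intro x hx
      rw [List.mem_toFinset] at *
      exact hsub x hx
    have h3 := Finset.card_le_card h2
    have h4 := free.toFinset_card_le
    omega
  omega

-- head decomposition of the filtered combinations-of-combinations
theorem mainA (x : Int) (A1 C0 : List (List Int)) (k' : Nat) :
    (pvComb (A1.map (x :: ·) ++ C0) (k' + 1)).filter (fun p => pvChk p [])
      = (A1.flatMap fun c =>
          ((pvComb (C0.filter (fun g => g.all fun y => !decide (y ∈ x :: c))) k').filter
              (fun p => pvChk p [])).map (fun p => (x :: c) :: p))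
        ++ (pvComb C0 (k' + 1)).filter (fun p => pvChk p []) := by
  induction A1 with
  | nil => simp
  | cons c A1' ih =>
    simp only [List.map_cons, List.cons_append]
    have hstep : pvComb ((x :: c) :: (A1'.map (x :: ·) ++ C0)) (k' + 1)
        = ((pvComb (A1'.map (x :: ·) ++ C0) k').map ((x :: c) :: ·))
          ++ pvComb (A1'.map (x :: ·) ++ C0) (k' + 1) := rfl
    rw [hstep, List.filter_append, List.filter_map]
    have hpred : ((fun p => pvChk p []) ∘ ((x :: c) :: ·)) = fun p => pvChk p (x :: c) := by
      funext q; simp [Function.comp, pvChk]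
    rw [hpred, chk_filter_comb (x :: c) (A1'.map (x :: ·) ++ C0) k']
    have hdead : (A1'.map (x :: ·) ++ C0).filter (fun g => g.all fun y => !decide (y ∈ x :: c))
        = C0.filter (fun g => g.all fun y => !decide (y ∈ x :: c)) := by
      rw [List.filter_append]
      have hz : (A1'.map (x :: ·)).filter (fun g => g.all fun y => !decide (y ∈ x :: c)) = [] := by
        rw [List.filter_eq_nil_iff]
        intro g hg
        rcases List.mem_map.mp hg with ⟨d, _, rfl⟩
        simp [List.all_cons]
      rw [hz, List.nil_append]
    rw [hdead, ih]
    simp [List.flatMap_cons, List.append_assoc]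

-- the main invariant: backtracking = filtered combinations-of-combinations
theorem backtrack_eq (n' : Nat) (hn : 1 ≤ n') :
    ∀ (free : List Int) (k : Nat), free.Nodup →
      pvBacktrack n' free k = (pvComb (pvComb free n') k).filter (fun p => pvChk p []) := by
  suffices H : ∀ (N : Nat) (free : List Int), free.length ≤ N → ∀ (k : Nat), free.Nodup →
      pvBacktrack n' free k = (pvComb (pvComb free n') k).filter (fun p => pvChk p []) by
    intro free k hnd
    exact H free.length free le_rfl k hnd
  intro N
  induction N with
  | zero =>
    intro free hlen k hnd
    have hfe : free = [] := List.eq_nil_of_length_eq_zero (Nat.le_zero.mp hlen)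
    subst hfe
    cases k with
    | zero => simp [pvBacktrack, pvComb, pvChk]
    | succ k =>
      obtain ⟨m, rfl⟩ : ∃ m, n' = m + 1 := ⟨n' - 1, by omega⟩
      have hpos : 0 < (k + 1) * (m + 1) := Nat.mul_pos (Nat.succ_pos k) (Nat.succ_pos m)
      simp [pvBacktrack, pvComb, hpos]
  | succ N ihN =>
    intro free hlen k hnd
    cases k with
    | zero => simp [pvBacktrack, pvComb, pvChk]
    | succ k' =>
      by_cases hlt : free.length < (k' + 1) * n'
      · rw [pvBacktrack.eq_def]
        simp only [if_pos hlt]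
        rw [comb_prune free n' (k' + 1) hnd hlt]
      · cases free with
        | nil =>
          exfalso
          have : 0 < (k' + 1) * n' := Nat.mul_pos (Nat.succ_pos k') (by omega)
          simp only [List.length_nil] at hlt
          omega
        | cons x rest =>
          obtain ⟨m, rfl⟩ : ∃ m, n' = m + 1 := ⟨n' - 1, by omega⟩
          obtain ⟨hx, hndr⟩ := List.nodup_cons.mp hnd
          have hlenr : rest.length ≤ N := by
            simp only [List.length_cons] at hlen
            omega
          rw [pvBacktrack.eq_def]
          simp only [if_neg hlt, Nat.add_sub_cancel]
          have hcomb : pvComb (x :: rest) (m + 1)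
              = (pvComb rest m).map (x :: ·) ++ pvComb rest (m + 1) := rfl
          rw [hcomb, mainA x (pvComb rest m) (pvComb rest (m + 1)) k']
          congr 1
          · refine flatMap_congr_mem _ _ _ ?_
            intro c hc
            have h1 : (pvComb rest (m + 1)).filter (fun g => g.all fun y => !decide (y ∈ x :: c))
                = pvComb (rest.filter fun y => !decide (y ∈ x :: c)) (m + 1) :=
              comb_restrict _ rest (m + 1)
            have h2 : (rest.filter fun y => !decide (y ∈ x :: c))
                = rest.filter fun y => !decide (y ∈ c) := by
              apply List.filter_congr
              intro y hy
              have hyx : y ≠ x := fun h => hx (h ▸ hy)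
              simp [List.mem_cons, hyx]
            rw [h1, h2,
              ihN (rest.filter fun y => !decide (y ∈ c))
                (le_trans (List.length_filter_le _ _) hlenr) k' (hndr.filter _)]
          · exact ihN rest hlenr (k' + 1) hndr

-- ===== VERDICT (by name: the statement is the Claim_ definition above) =====
theorem setpartition_spec : Claim_equal_setpartition := by
  intro iterable n _ hpre
  obtain ⟨hn, hnd⟩ := hpre
  unfold Spec_setpartition setpartition setpartition_alt
  have h1 : 1 ≤ n.toNat := by omega
  rw [backtrack_eq n.toNat h1 iterable _ hnd]
  refine List.filter_congr ?_
  intro p _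
  exact pvSeenLoop_eq_chk p PySem.Set.empty [] (by simp [PySem.Set.empty])
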